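-- pv_equiv track=rewrite | github.com/DrompiX/search_engine | search_engine/inexact.py | filter_docs
-- ===== SOURCE A (Python) =====
-- def filter_docs(query, high_low_index, min_n_docs):
--     """
--     Return a set of documents in which query terms are found.
--     You are interested in getting the best documents for a query, therefore you
--     will sequentially check for the following conditions and stop whenever you meet one.
--     For each condition also check if number of documents is  >= min_n_docs.
--     1) We consider only high lists for the query terms and return a set of documents such that each document contains
--     ALL query terms.
--     2) We search in both high and low lists, but still require that each returned document should contain ALL query terms.
--     3) We consider only high lists for the query terms and return a set of documents such that each document contains
--     AT LEAST ONE query term. Actually, a union of high sets.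
--     4) At this stage we are fine with both high and low lists, return a set of documents such that each of them contains
--     AT LEAST ONE query term.
--
--     :param query: dictionary term:count
--     :param high_low_index: high-low index you built before
--     :param min_n_docs: minimum number of documents we want to receive
--     :return: set if doc_ids
--     """
--     result = set()
--
--     started = False
--     for term in query.keys():
--         term_info = high_low_index[term]
--         if not started:
--             result = set(term_info[0].keys())
--             started = True
--         else:
--             result = result & set(term_info[0].keys())
--
--     if len(result) >= min_n_docs:
--         return result
--
--     started = False
--     for term in query.keys():
--         term_info = high_low_index[term]
--         if not started:
--             result = set(term_info[0].keys()) | set(term_info[1].keys())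
--             started = True
--         else:
--             result = result & (set(term_info[0].keys()) | set(term_info[1].keys()))
--
--     if len(result) >= min_n_docs:
--         return result
--
--     started = False
--     for term in query.keys():
--         term_info = high_low_index[term]
--         if not started:
--             result = set(term_info[0].keys())
--             started = True
--         else:
--             result = result | set(term_info[0].keys())
--
--     if len(result) >= min_n_docs:
--         return result
--
--     started = False
--     for term in query.keys():
--         term_info = high_low_index[term]
--         if not started:
--             result = set(term_info[0].keys()) | set(term_info[1].keys())
--             started = True
--         else:
--             result = result | (set(term_info[0].keys()) | set(term_info[1].keys()))
--
--     if len(result) >= min_n_docs: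
--         return result
-- ===== SOURCE B (Python) =====
-- def filter_docs(query, high_low_index, min_n_docs):
--     # One fused pass over the query terms maintaining all four candidate sets
--     # (high-intersection, high+low-intersection, high-union, high+low-union),
--     # then the first candidate meeting the threshold wins.
--     acc = None
--     for term in query:
--         info = high_low_index[term]
--         high = set(info[0])
--         hilo = high | (set(info[1]) if len(info) > 1 else set())
--         if acc is None:
--             acc = (high, hilo, high, hilo)
--         else:
--             ih, il, uh, ul = acc
--             acc = (ih & high, il & hilo, uh | high, ul | hilo)
--     if acc is None:
--         acc = (set(), set(), set(), set())
--     for cand in acc: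
--         if len(cand) >= min_n_docs:
--             return cand
--     return None
-- ===== Notes on version B (the rewrite author's own statement) =====
-- stated objective: alternative
-- what changed: Replaces A's four sequential started-flag loops (one per tier, each rebuilding the per-term key sets) by a single fused pass over the query terms that maintains all four candidate sets in one 4-tuple accumulator, followed by one data-driven scan that returns the first candidate meeting the threshold.
import Mathlib
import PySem

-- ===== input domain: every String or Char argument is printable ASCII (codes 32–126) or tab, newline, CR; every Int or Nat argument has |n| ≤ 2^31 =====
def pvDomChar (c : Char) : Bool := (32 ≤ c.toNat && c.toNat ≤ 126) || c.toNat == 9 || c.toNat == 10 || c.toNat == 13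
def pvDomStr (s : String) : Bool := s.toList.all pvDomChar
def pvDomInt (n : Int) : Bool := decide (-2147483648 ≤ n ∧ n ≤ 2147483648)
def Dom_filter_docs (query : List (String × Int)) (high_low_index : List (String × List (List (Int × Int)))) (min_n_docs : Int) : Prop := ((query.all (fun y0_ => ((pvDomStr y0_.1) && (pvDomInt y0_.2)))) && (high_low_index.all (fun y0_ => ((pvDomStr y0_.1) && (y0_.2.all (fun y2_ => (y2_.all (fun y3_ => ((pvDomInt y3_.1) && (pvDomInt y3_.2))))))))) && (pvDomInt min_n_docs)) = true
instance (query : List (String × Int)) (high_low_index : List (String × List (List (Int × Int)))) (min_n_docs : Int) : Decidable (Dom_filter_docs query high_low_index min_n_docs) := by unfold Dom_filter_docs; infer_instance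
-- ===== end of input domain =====

-- B fuses A's four sequential started-flag tier loops into ONE pass over the query terms that
-- maintains all four candidate sets in a 4-tuple accumulator, then scans the candidates for the
-- first one meeting the threshold; objective: alternative decomposition (equivalence is about the
-- return value; neither version mutates its arguments).

-- ===== PORT A =====
-- literal transliteration of A: four sequential started-flag loops over the query's keys,
-- each followed by a size check; dict lookups/index accesses are total forms (getD/pyGetD),
-- exact under Pre_filter_docs.
def filter_docs (query : List (String × Int)) (high_low_index : List (String × List (List (Int × Int)))) (min_n_docs : Int) : Option (List Int) :=
  let idx := PySem.Dict.ofList high_low_index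
  let ks := PySem.List.dedup (query.map Prod.fst)
  let st1 := ks.foldl (fun (st : Bool × PySem.Set Int) term =>
      if st.1 = false then
        (true, PySem.Set.ofList ((PySem.List.pyGetD (idx.getD term []) 0 []).map Prod.fst))
      else
        (true, PySem.Set.inter st.2 (PySem.Set.ofList ((PySem.List.pyGetD (idx.getD term []) 0 []).map Prod.fst))))
    (false, PySem.Set.empty)
  if PySem.Set.len st1.2 ≥ min_n_docs then some st1.2 else
  let st2 := ks.foldl (fun (st : Bool × PySem.Set Int) term =>
      if st.1 = false then
        (true, PySem.Set.union (PySem.Set.ofList ((PySem.List.pyGetD (idx.getD term []) 0 []).map Prod.fst)) (PySem.Set.ofList ((PySem.List.pyGetD (idx.getD term []) 1 []).map Prod.fst)))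
      else
        (true, PySem.Set.inter st.2 (PySem.Set.union (PySem.Set.ofList ((PySem.List.pyGetD (idx.getD term []) 0 []).map Prod.fst)) (PySem.Set.ofList ((PySem.List.pyGetD (idx.getD term []) 1 []).map Prod.fst)))))
    (false, PySem.Set.empty)
  if PySem.Set.len st2.2 ≥ min_n_docs then some st2.2 else
  let st3 := ks.foldl (fun (st : Bool × PySem.Set Int) term =>
      if st.1 = false then
        (true, PySem.Set.ofList ((PySem.List.pyGetD (idx.getD term []) 0 []).map Prod.fst))
      else
        (true, PySem.Set.union st.2 (PySem.Set.ofList ((PySem.List.pyGetD (idx.getD term []) 0 []).map Prod.fst))))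
    (false, PySem.Set.empty)
  if PySem.Set.len st3.2 ≥ min_n_docs then some st3.2 else
  let st4 := ks.foldl (fun (st : Bool × PySem.Set Int) term =>
      if st.1 = false then
        (true, PySem.Set.union (PySem.Set.ofList ((PySem.List.pyGetD (idx.getD term []) 0 []).map Prod.fst)) (PySem.Set.ofList ((PySem.List.pyGetD (idx.getD term []) 1 []).map Prod.fst)))
      else
        (true, PySem.Set.union st.2 (PySem.Set.union (PySem.Set.ofList ((PySem.List.pyGetD (idx.getD term []) 0 []).map Prod.fst)) (PySem.Set.ofList ((PySem.List.pyGetD (idx.getD term []) 1 []).map Prod.fst)))))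
    (false, PySem.Set.empty)
  if PySem.Set.len st4.2 ≥ min_n_docs then some st4.2 else
  none

-- ===== PORT B =====
-- transliteration of Source B: one fold over the query terms carrying an Option of a 4-tuple of sets
-- (inter-high, inter-hilo, union-high, union-hilo), then a findSome? scan over the four candidates.
def pvQuad := PySem.Set Int × PySem.Set Int × PySem.Set Int × PySem.Set Int

def pvStepB (idx : PySem.Dict String (List (List (Int × Int)))) (acc : Option pvQuad) (term : String) : Option pvQuad :=
  let info := idx.getD term []
  let high := PySem.Set.ofList ((PySem.List.pyGetD info 0 []).map Prod.fst)
  let hilo := PySem.Set.union high (if 1 < info.length then PySem.Set.ofList ((PySem.List.pyGetD info 1 []).map Prod.fst) else PySem.Set.empty)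
  match acc with
  | none => some (high, hilo, high, hilo)
  | some (ih, il, uh, ul) => some (PySem.Set.inter ih high, PySem.Set.inter il hilo, PySem.Set.union uh high, PySem.Set.union ul hilo)

def filter_docs_alt (query : List (String × Int)) (high_low_index : List (String × List (List (Int × Int)))) (min_n_docs : Int) : Option (List Int) :=
  let idx := PySem.Dict.ofList high_low_index
  let acc := (PySem.List.dedup (query.map Prod.fst)).foldl (pvStepB idx) none
  let c := acc.getD (PySem.Set.empty, PySem.Set.empty, PySem.Set.empty, PySem.Set.empty)
  [c.1, c.2.1, c.2.2.1, c.2.2.2].findSome? (fun cand => if PySem.Set.len cand ≥ min_n_docs then some cand else none)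

-- ===== PRECONDITION & SPEC =====
-- Pre_ = exactly the inputs where the Python A returns: every (distinct) query term is a key of the
-- index whose value list is nonempty, and either the query is empty, or every such value list also
-- has a low dict (length ≥ 2), or stage 1 already succeeds (the distinct doc ids common to all the
-- terms' high dicts number at least min_n_docs) so the low dicts are never indexed.
def Pre_filter_docs (query : List (String × Int)) (high_low_index : List (String × List (List (Int × Int)))) (min_n_docs : Int) : Prop :=
  let idx := PySem.Dict.ofList high_low_index
  let terms := PySem.List.dedup (query.map Prod.fst)
  (∀ t ∈ terms, (idx.get? t).isSome ∧ 1 ≤ (idx.getD t []).length) ∧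
  (terms = [] ∨
   (∀ t ∈ terms, 2 ≤ (idx.getD t []).length) ∨
   min_n_docs ≤ ((PySem.List.dedup (((idx.getD (terms.headD "") []).headD []).map Prod.fst)).filter
      (fun d => terms.tail.all (fun t => decide (d ∈ ((idx.getD t []).headD []).map Prod.fst)))).length)
instance (query : List (String × Int)) (high_low_index : List (String × List (List (Int × Int)))) (min_n_docs : Int) : Decidable (Pre_filter_docs query high_low_index min_n_docs) := by unfold Pre_filter_docs; infer_instance

def pvWitness_filter_docs : (List (String × Int)) × (List (String × List (List (Int × Int)))) × Int :=
  ([("a", 1), ("b", 2)], [("a", [[(1, 3), (2, 1)], [(4, 1)]]), ("b", [[(1, 2)], []])], 1)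

def Spec_filter_docs (query : List (String × Int)) (high_low_index : List (String × List (List (Int × Int)))) (min_n_docs : Int) (out : Option (List Int)) : Prop := out = filter_docs_alt query high_low_index min_n_docs
instance (query : List (String × Int)) (high_low_index : List (String × List (List (Int × Int)))) (min_n_docs : Int) (out : Option (List Int)) : Decidable (Spec_filter_docs query high_low_index min_n_docs out) := by unfold Spec_filter_docs; infer_instance

-- ===== CLAIM (what is proved, stated in full; the proofs are below) =====
def Claim_equal_filter_docs : Prop := ∀ (query : List (String × Int)) (high_low_index : List (String × List (List (Int × Int)))) (min_n_docs : Int), Dom_filter_docs query high_low_index min_n_docs → Pre_filter_docs query high_low_index min_n_docs → Spec_filter_docs query high_low_index min_n_docs (filter_docs query high_low_index min_n_docs)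

-- ===== LEMMAS AND PROOFS =====

-- B's guarded low set coincides with the total pyGetD form used in A's port
theorem pvLowGuard (info : List (List (Int × Int))) :
    (if 1 < info.length then PySem.Set.ofList ((PySem.List.pyGetD info 1 []).map Prod.fst) else PySem.Set.empty)
      = PySem.Set.ofList ((PySem.List.pyGetD info 1 []).map Prod.fst) := by
  by_cases h : 1 < info.length
  · rw [if_pos h]
  · have hz : PySem.List.pyGetD info 1 [] = [] := by
      cases info with
      | nil => rfl
      | cons a t =>
          cases t with
          | nil => rfl
          | cons b u => exact absurd (Nat.succ_lt_succ (Nat.succ_pos u.length)) h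
    rw [if_neg h, hz]; rfl

theorem pvStepB_none (idx : PySem.Dict String (List (List (Int × Int)))) (x : String) :
    pvStepB idx none x
      = some (PySem.Set.ofList ((PySem.List.pyGetD (idx.getD x []) 0 []).map Prod.fst),
              PySem.Set.union (PySem.Set.ofList ((PySem.List.pyGetD (idx.getD x []) 0 []).map Prod.fst)) (PySem.Set.ofList ((PySem.List.pyGetD (idx.getD x []) 1 []).map Prod.fst)),
              PySem.Set.ofList ((PySem.List.pyGetD (idx.getD x []) 0 []).map Prod.fst),
              PySem.Set.union (PySem.Set.ofList ((PySem.List.pyGetD (idx.getD x []) 0 []).map Prod.fst)) (PySem.Set.ofList ((PySem.List.pyGetD (idx.getD x []) 1 []).map Prod.fst))) := by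
  dsimp only [pvStepB]
  rw [pvLowGuard]
  rfl

theorem pvStepB_some (idx : PySem.Dict String (List (List (Int × Int)))) (x : String)
    (a b c d : PySem.Set Int) :
    pvStepB idx (some (a, b, c, d)) x
      = some (PySem.Set.inter a (PySem.Set.ofList ((PySem.List.pyGetD (idx.getD x []) 0 []).map Prod.fst)),
              PySem.Set.inter b (PySem.Set.union (PySem.Set.ofList ((PySem.List.pyGetD (idx.getD x []) 0 []).map Prod.fst)) (PySem.Set.ofList ((PySem.List.pyGetD (idx.getD x []) 1 []).map Prod.fst))),
              PySem.Set.union c (PySem.Set.ofList ((PySem.List.pyGetD (idx.getD x []) 0 []).map Prod.fst)),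
              PySem.Set.union d (PySem.Set.union (PySem.Set.ofList ((PySem.List.pyGetD (idx.getD x []) 0 []).map Prod.fst)) (PySem.Set.ofList ((PySem.List.pyGetD (idx.getD x []) 1 []).map Prod.fst)))) := by
  dsimp only [pvStepB]
  rw [pvLowGuard]
  rfl

-- B's fused fold, once started, is the 4-tuple of plain foldls
theorem pvQuadRun (idx : PySem.Dict String (List (List (Int × Int)))) (l : List String)
    (a b c d : PySem.Set Int) :
    l.foldl (pvStepB idx) (some (a, b, c, d))
      = some (l.foldl (fun s t => PySem.Set.inter s (PySem.Set.ofList ((PySem.List.pyGetD (idx.getD t []) 0 []).map Prod.fst))) a,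
              l.foldl (fun s t => PySem.Set.inter s (PySem.Set.union (PySem.Set.ofList ((PySem.List.pyGetD (idx.getD t []) 0 []).map Prod.fst)) (PySem.Set.ofList ((PySem.List.pyGetD (idx.getD t []) 1 []).map Prod.fst)))) b,
              l.foldl (fun s t => PySem.Set.union s (PySem.Set.ofList ((PySem.List.pyGetD (idx.getD t []) 0 []).map Prod.fst))) c,
              l.foldl (fun s t => PySem.Set.union s (PySem.Set.union (PySem.Set.ofList ((PySem.List.pyGetD (idx.getD t []) 0 []).map Prod.fst)) (PySem.Set.ofList ((PySem.List.pyGetD (idx.getD t []) 1 []).map Prod.fst)))) d) := by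
  induction l generalizing a b c d with
  | nil => rfl
  | cons x xs ih =>
      simp only [List.foldl_cons, pvStepB_some]
      exact ih _ _ _ _

-- B's whole fold on a nonempty term list
theorem pvQuadStart (idx : PySem.Dict String (List (List (Int × Int)))) (x : String) (xs : List String) :
    (x :: xs).foldl (pvStepB idx) none
      = some (xs.foldl (fun s t => PySem.Set.inter s (PySem.Set.ofList ((PySem.List.pyGetD (idx.getD t []) 0 []).map Prod.fst))) (PySem.Set.ofList ((PySem.List.pyGetD (idx.getD x []) 0 []).map Prod.fst)),
              xs.foldl (fun s t => PySem.Set.inter s (PySem.Set.union (PySem.Set.ofList ((PySem.List.pyGetD (idx.getD t []) 0 []).map Prod.fst)) (PySem.Set.ofList ((PySem.List.pyGetD (idx.getD t []) 1 []).map Prod.fst)))) (PySem.Set.union (PySem.Set.ofList ((PySem.List.pyGetD (idx.getD x []) 0 []).map Prod.fst)) (PySem.Set.ofList ((PySem.List.pyGetD (idx.getD x []) 1 []).map Prod.fst))),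
              xs.foldl (fun s t => PySem.Set.union s (PySem.Set.ofList ((PySem.List.pyGetD (idx.getD t []) 0 []).map Prod.fst))) (PySem.Set.ofList ((PySem.List.pyGetD (idx.getD x []) 0 []).map Prod.fst)),
              xs.foldl (fun s t => PySem.Set.union s (PySem.Set.union (PySem.Set.ofList ((PySem.List.pyGetD (idx.getD t []) 0 []).map Prod.fst)) (PySem.Set.ofList ((PySem.List.pyGetD (idx.getD t []) 1 []).map Prod.fst)))) (PySem.Set.union (PySem.Set.ofList ((PySem.List.pyGetD (idx.getD x []) 0 []).map Prod.fst)) (PySem.Set.ofList ((PySem.List.pyGetD (idx.getD x []) 1 []).map Prod.fst)))) := by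
  simp only [List.foldl_cons, pvStepB_none]
  exact pvQuadRun idx xs _ _ _ _

-- once started, A's flag loop is a plain foldl over the remaining terms
theorem pvFlagRun {β : Type} (h0 : β → PySem.Set Int) (g : PySem.Set Int → β → PySem.Set Int) (l : List β) (a : PySem.Set Int) :
    (l.foldl (fun (st : Bool × PySem.Set Int) t => if st.1 = false then (true, h0 t) else (true, g st.2 t)) (true, a))
      = (true, l.foldl g a) := by
  induction l generalizing a with
  | nil => rfl
  | cons x xs ih => exact ih (g a x)

-- A's whole flag loop on a nonempty term list
theorem pvFlagFold {β : Type} (f : β → PySem.Set Int) (g : PySem.Set Int → β → PySem.Set Int) (x : β) (xs : List β) :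
    ((x :: xs).foldl (fun (st : Bool × PySem.Set Int) t => if st.1 = false then (true, f t) else (true, g st.2 t)) (false, PySem.Set.empty)).2
      = xs.foldl g (f x) := by
  simp only [List.foldl_cons]
  rw [if_pos trivial]
  exact congrArg Prod.snd (pvFlagRun f g xs (f x))

-- A's four tier loops, phrased on the port's literal loop bodies
theorem pvStage1 (idx : PySem.Dict String (List (List (Int × Int)))) (x : String) (xs : List String) :
    ((x :: xs).foldl (fun (st : Bool × PySem.Set Int) term =>
      if st.1 = false then
        (true, PySem.Set.ofList ((PySem.List.pyGetD (idx.getD term []) 0 []).map Prod.fst))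
      else
        (true, PySem.Set.inter st.2 (PySem.Set.ofList ((PySem.List.pyGetD (idx.getD term []) 0 []).map Prod.fst))))
      (false, PySem.Set.empty)).2
      = xs.foldl (fun s t => PySem.Set.inter s (PySem.Set.ofList ((PySem.List.pyGetD (idx.getD t []) 0 []).map Prod.fst))) (PySem.Set.ofList ((PySem.List.pyGetD (idx.getD x []) 0 []).map Prod.fst)) :=
  pvFlagFold (fun term => PySem.Set.ofList ((PySem.List.pyGetD (idx.getD term []) 0 []).map Prod.fst)) (fun s term => PySem.Set.inter s (PySem.Set.ofList ((PySem.List.pyGetD (idx.getD term []) 0 []).map Prod.fst))) x xs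

theorem pvStage2 (idx : PySem.Dict String (List (List (Int × Int)))) (x : String) (xs : List String) :
    ((x :: xs).foldl (fun (st : Bool × PySem.Set Int) term =>
      if st.1 = false then
        (true, PySem.Set.union (PySem.Set.ofList ((PySem.List.pyGetD (idx.getD term []) 0 []).map Prod.fst)) (PySem.Set.ofList ((PySem.List.pyGetD (idx.getD term []) 1 []).map Prod.fst)))
      else
        (true, PySem.Set.inter st.2 (PySem.Set.union (PySem.Set.ofList ((PySem.List.pyGetD (idx.getD term []) 0 []).map Prod.fst)) (PySem.Set.ofList ((PySem.List.pyGetD (idx.getD term []) 1 []).map Prod.fst)))))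
      (false, PySem.Set.empty)).2
      = xs.foldl (fun s t => PySem.Set.inter s (PySem.Set.union (PySem.Set.ofList ((PySem.List.pyGetD (idx.getD t []) 0 []).map Prod.fst)) (PySem.Set.ofList ((PySem.List.pyGetD (idx.getD t []) 1 []).map Prod.fst)))) (PySem.Set.union (PySem.Set.ofList ((PySem.List.pyGetD (idx.getD x []) 0 []).map Prod.fst)) (PySem.Set.ofList ((PySem.List.pyGetD (idx.getD x []) 1 []).map Prod.fst))) :=
  pvFlagFold (fun term => PySem.Set.union (PySem.Set.ofList ((PySem.List.pyGetD (idx.getD term []) 0 []).map Prod.fst)) (PySem.Set.ofList ((PySem.List.pyGetD (idx.getD term []) 1 []).map Prod.fst))) (fun s term => PySem.Set.inter s ((fun term => PySem.Set.union (PySem.Set.ofList ((PySem.List.pyGetD (idx.getD term []) 0 []).map Prod.fst)) (PySem.Set.ofList ((PySem.List.pyGetD (idx.getD term []) 1 []).map Prod.fst))) term)) x xs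

theorem pvStage3 (idx : PySem.Dict String (List (List (Int × Int)))) (x : String) (xs : List String) :
    ((x :: xs).foldl (fun (st : Bool × PySem.Set Int) term =>
      if st.1 = false then
        (true, PySem.Set.ofList ((PySem.List.pyGetD (idx.getD term []) 0 []).map Prod.fst))
      else
        (true, PySem.Set.union st.2 (PySem.Set.ofList ((PySem.List.pyGetD (idx.getD term []) 0 []).map Prod.fst))))
      (false, PySem.Set.empty)).2
      = xs.foldl (fun s t => PySem.Set.union s (PySem.Set.ofList ((PySem.List.pyGetD (idx.getD t []) 0 []).map Prod.fst))) (PySem.Set.ofList ((PySem.List.pyGetD (idx.getD x []) 0 []).map Prod.fst)) :=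
  pvFlagFold (fun term => PySem.Set.ofList ((PySem.List.pyGetD (idx.getD term []) 0 []).map Prod.fst)) (fun s term => PySem.Set.union s (PySem.Set.ofList ((PySem.List.pyGetD (idx.getD term []) 0 []).map Prod.fst))) x xs

theorem pvStage4 (idx : PySem.Dict String (List (List (Int × Int)))) (x : String) (xs : List String) :
    ((x :: xs).foldl (fun (st : Bool × PySem.Set Int) term =>
      if st.1 = false then
        (true, PySem.Set.union (PySem.Set.ofList ((PySem.List.pyGetD (idx.getD term []) 0 []).map Prod.fst)) (PySem.Set.ofList ((PySem.List.pyGetD (idx.getD term []) 1 []).map Prod.fst)))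
      else
        (true, PySem.Set.union st.2 (PySem.Set.union (PySem.Set.ofList ((PySem.List.pyGetD (idx.getD term []) 0 []).map Prod.fst)) (PySem.Set.ofList ((PySem.List.pyGetD (idx.getD term []) 1 []).map Prod.fst)))))
      (false, PySem.Set.empty)).2
      = xs.foldl (fun s t => PySem.Set.union s (PySem.Set.union (PySem.Set.ofList ((PySem.List.pyGetD (idx.getD t []) 0 []).map Prod.fst)) (PySem.Set.ofList ((PySem.List.pyGetD (idx.getD t []) 1 []).map Prod.fst)))) (PySem.Set.union (PySem.Set.ofList ((PySem.List.pyGetD (idx.getD x []) 0 []).map Prod.fst)) (PySem.Set.ofList ((PySem.List.pyGetD (idx.getD x []) 1 []).map Prod.fst))) :=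
  pvFlagFold (fun term => PySem.Set.union (PySem.Set.ofList ((PySem.List.pyGetD (idx.getD term []) 0 []).map Prod.fst)) (PySem.Set.ofList ((PySem.List.pyGetD (idx.getD term []) 1 []).map Prod.fst))) (fun s term => PySem.Set.union s ((fun term => PySem.Set.union (PySem.Set.ofList ((PySem.List.pyGetD (idx.getD term []) 0 []).map Prod.fst)) (PySem.Set.ofList ((PySem.List.pyGetD (idx.getD term []) 1 []).map Prod.fst))) term)) x xs

-- B's final scan over the four candidates is A's if-chain
theorem pvSelect (c1 c2 c3 c4 : PySem.Set Int) (m : Int) :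
    (if PySem.Set.len c1 ≥ m then some c1 else
     if PySem.Set.len c2 ≥ m then some c2 else
     if PySem.Set.len c3 ≥ m then some c3 else
     if PySem.Set.len c4 ≥ m then some c4 else none)
      = [c1, c2, c3, c4].findSome? (fun cand => if PySem.Set.len cand ≥ m then some cand else none) := by
  simp only [List.findSome?_cons, List.findSome?_nil]
  split_ifs <;> rfl

-- ===== VERDICT (by name: the statement is the Claim_ definition above) =====
theorem filter_docs_spec : Claim_equal_filter_docs := by
  intro query high_low_index min_n_docs _ _
  unfold Spec_filter_docs filter_docs filter_docs_alt
  dsimp only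
  rw [← pvSelect]
  cases h : PySem.List.dedup (query.map Prod.fst) with
  | nil => rfl
  | cons x xs =>
      rw [pvStage1, pvStage2, pvStage3, pvStage4, pvQuadStart]
      rfl
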